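-- pv_equiv track=rewrite | github.com/facup94/AoC2018 | 2/day2.py | count
-- ===== SOURCE A (Python) =====
-- def count(id):
--     letters = {}
--     has_2 = False
--     has_3 = False
--     for letter in id:
--         if letter not in letters:
--             letters[letter] = 0
--
--         letters[letter] += 1
--
--     for a in letters.values():
--         if a == 2:
--             has_2 = True
--         if a == 3:
--             has_3 = True
--
--     return has_2, has_3
-- ===== SOURCE B (Python) =====
-- def count(id):
--     # Sort the characters, then scan maximal runs of equal adjacent characters:
--     # a run of length 2/3 means some letter occurs exactly twice/thrice.
--     s = sorted(id)
--     n = len(s)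
--     has_2 = False
--     has_3 = False
--     i = 0
--     while i < n:
--         j = i + 1
--         while j < n and s[j] == s[i]:
--             j += 1
--         if j - i == 2:
--             has_2 = True
--         if j - i == 3:
--             has_3 = True
--         i = j
--     return has_2, has_3
-- ===== Notes on version B (the rewrite author's own statement) =====
-- stated objective: alternative
-- what changed: Replaces the hand-built counting dict plus value scan with sort-then-group: sort the characters and scan maximal runs of equal adjacent characters with two index pointers, flagging runs of length exactly 2 or 3.
import Mathlib
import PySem

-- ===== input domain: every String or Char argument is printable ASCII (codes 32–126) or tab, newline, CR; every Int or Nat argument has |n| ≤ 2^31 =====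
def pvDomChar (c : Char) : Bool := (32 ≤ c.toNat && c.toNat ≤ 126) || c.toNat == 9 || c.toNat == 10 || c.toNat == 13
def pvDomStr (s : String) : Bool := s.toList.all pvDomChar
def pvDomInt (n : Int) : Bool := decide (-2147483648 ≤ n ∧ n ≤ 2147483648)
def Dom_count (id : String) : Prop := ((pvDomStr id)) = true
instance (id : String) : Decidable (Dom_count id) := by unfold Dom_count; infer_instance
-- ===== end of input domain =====

-- B replaces A's counting dict + value scan by sort-then-group: sort the characters
-- and scan maximal runs of equal adjacent characters (alternative algorithm, not faster).

-- ===== PORT A =====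
def count (id : String) : Bool × Bool :=
  -- letters = {}; for letter in id: if letter not in letters: letters[letter] = 0; letters[letter] += 1
  let letters : PySem.Dict Char Int :=
    id.toList.foldl (fun d letter =>
      let d' := if d.contains letter then d else d.insert letter 0
      d'.insert letter (d'.getD letter 0 + 1)) PySem.Dict.empty
  -- for a in letters.values(): if a == 2: has_2 = True; if a == 3: has_3 = True
  letters.values.foldl (fun hs a =>
    (if a == 2 then true else hs.1, if a == 3 then true else hs.2)) (false, false)

-- ===== PORT B =====
-- inner while: j = i + 1; while j < n and s[j] == s[i]: j += 1   (returns final j)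
def runEnd (s : List Char) (c : Char) (j : Nat) : Nat :=
  if h : j < s.length then
    if s[j] = c then runEnd s c (j + 1) else j
  else j
termination_by s.length - j

theorem runEnd_ge (s : List Char) (c : Char) (j : Nat) : j ≤ runEnd s c j := by
  fun_induction runEnd with
  | case1 j h heq ih => omega
  | case2 => omega
  | case3 => omega

-- outer while over the sorted list, by index
def scanIdx (s : List Char) (i : Nat) (h2 h3 : Bool) : Bool × Bool :=
  if h : i < s.length then
    let j := runEnd s s[i] (i + 1)
    scanIdx s j (if j - i = 2 then true else h2) (if j - i = 3 then true else h3)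
  else (h2, h3)
termination_by s.length - i
decreasing_by
  have := runEnd_ge s s[i] (i + 1)
  omega

def count_alt (id : String) : Bool × Bool :=
  scanIdx (PySem.List.sorted id.toList (fun x => x) false) 0 false false

-- ===== PRECONDITION & SPEC =====
def Spec_count (id : String) (out : Bool × Bool) : Prop := out = count_alt id
instance (id : String) (out : Bool × Bool) : Decidable (Spec_count id out) := by unfold Spec_count; infer_instance

-- ===== CLAIM (what is proved, stated in full; the proofs are below) =====
def Claim_equal_count : Prop := ∀ (id : String), Dom_count id → Spec_count id (count id)

-- ===== LEMMAS AND PROOFS =====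

-- proof-only model of B's scan as structural recursion on the list
def runSplit (c : Char) : List Char → Nat × List Char
  | [] => (0, [])
  | x :: xs =>
    if x = c then
      let p := runSplit c xs
      (p.1 + 1, p.2)
    else (0, x :: xs)

theorem runSplit_length_le (c : Char) (xs : List Char) :
    (runSplit c xs).2.length ≤ xs.length := by
  induction xs with
  | nil => simp [runSplit]
  | cons x xs ih =>
    simp only [runSplit]
    split
    · exact le_trans ih (Nat.le_succ _)
    · simp

def scanRuns : List Char → Bool → Bool → Bool × Bool
  | [], h2, h3 => (h2, h3)
  | c :: rest, h2, h3 =>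
    let p := runSplit c rest
    let run := p.1 + 1
    scanRuns p.2 (if run = 2 then true else h2) (if run = 3 then true else h3)
termination_by l => l.length
decreasing_by
  simpa using Nat.lt_succ_of_le (runSplit_length_le c rest)

-- the index-based inner while equals the structural run split
theorem runEnd_eq (s : List Char) (c : Char) (j : Nat) :
    runEnd s c j = j + (runSplit c (s.drop j)).1 := by
  fun_induction runEnd with
  | case1 j h heq ih =>
    rw [List.drop_eq_getElem_cons h, runSplit, if_pos heq, ih]
    dsimp only
    omega
  | case2 j h heq =>
    rw [List.drop_eq_getElem_cons h, runSplit, if_neg heq]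
    simp
  | case3 j h =>
    rw [List.drop_eq_nil_of_le (by omega)]
    simp [runSplit]

theorem runEnd_drop (s : List Char) (c : Char) (j : Nat) :
    s.drop (runEnd s c j) = (runSplit c (s.drop j)).2 := by
  fun_induction runEnd with
  | case1 j h heq ih =>
    rw [ih, List.drop_eq_getElem_cons h, runSplit, if_pos heq]
  | case2 j h heq =>
    rw [List.drop_eq_getElem_cons h, runSplit, if_neg heq]
  | case3 j h =>
    rw [List.drop_eq_nil_of_le (by omega)]
    simp [runSplit]

-- the index-based outer while equals the structural scan
theorem scanIdx_eq (s : List Char) (i : Nat) (h2 h3 : Bool) :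
    scanIdx s i h2 h3 = scanRuns (s.drop i) h2 h3 := by
  fun_induction scanIdx with
  | case1 i h2 h3 h j ih =>
    rw [List.drop_eq_getElem_cons h, scanRuns]
    have hj : j = i + 1 + (runSplit s[i] (s.drop (i + 1))).1 := runEnd_eq s s[i] (i + 1)
    have hd : s.drop j = (runSplit s[i] (s.drop (i + 1))).2 := runEnd_drop s s[i] (i + 1)
    have hrun : (runSplit s[i] (s.drop (i + 1))).1 + 1 = j - i := by omega
    rw [hrun, ← hd]
    exact ih
  | case2 i h2 h3 h =>
    rw [List.drop_eq_nil_of_le (by omega), scanRuns]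

-- A's counting loop builds exactly collections.Counter of the characters.
theorem count_loop_eq_counter (id : String) :
    (id.toList.foldl (fun d letter =>
      let d' := if d.contains letter then d else d.insert letter 0
      d'.insert letter (d'.getD letter 0 + 1)) (PySem.Dict.empty : PySem.Dict Char Int))
      = PySem.Dict.counter id.toList := by
  rw [← PySem.Dict.foldl_insert_getD_add_one_eq_counter]
  apply PySem.List.foldl_congr_mem
  intro d x _
  by_cases h : d.contains x <;> simp [h, pysem]

theorem runSplit_split (c : Char) (xs : List Char) :
    xs = List.replicate (runSplit c xs).1 c ++ (runSplit c xs).2 := by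
  induction xs with
  | nil => simp [runSplit]
  | cons x xs ih =>
    simp only [runSplit]
    split
    · next h => simpa [List.replicate_succ, h] using ih
    · simp

theorem runSplit_rest_head (c : Char) (xs : List Char) :
    (runSplit c xs).2 = [] ∨ ∃ y t, (runSplit c xs).2 = y :: t ∧ y ≠ c := by
  induction xs with
  | nil => simp [runSplit]
  | cons x xs ih =>
    simp only [runSplit]
    split
    · simpa using ih
    · next h => exact Or.inr ⟨x, xs, rfl, h⟩

-- B's outer loop computes "some character occurs exactly 2 / exactly 3 times" on a sorted list.
theorem scanRuns_spec (n : Nat) : ∀ (l : List Char), l.length ≤ n →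
    l.Pairwise (· ≤ ·) → ∀ h2 h3,
    scanRuns l h2 h3 = (h2 || l.any (fun x => l.count x = 2),
                        h3 || l.any (fun x => l.count x = 3)) := by
  induction n with
  | zero =>
    intro l hl _ h2 h3
    have : l = [] := List.length_eq_zero_iff.mp (Nat.le_zero.mp hl)
    subst this; simp [scanRuns]
  | succ n ih =>
    intro l hl hp h2 h3
    match l, hp with
    | [], _ => simp [scanRuns]
    | c :: rest, hp =>
      rw [scanRuns]
      obtain ⟨hle, hrp⟩ := List.pairwise_cons.mp hp
      rcases hrs : runSplit c rest with ⟨k, rest'⟩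
      have hsplit : rest = List.replicate k c ++ rest' := by
        have := runSplit_split c rest; rwa [hrs] at this
      have hsubl : rest'.Sublist rest := by
        rw [hsplit]; exact List.sublist_append_right _ _
      have hrp' : rest'.Pairwise (· ≤ ·) := List.Pairwise.sublist hsubl hrp
      -- rest' contains no c
      have hnotc : c ∉ rest' := by
        have hh := runSplit_rest_head c rest
        rw [hrs] at hh
        rcases hh with h0 | ⟨y, t, heq, hne⟩
        · simp only at h0; simp [h0]
        · simp only at heq
          have hall : ∀ z ∈ rest', c ≤ z := fun z hz => hle z (hsubl.mem hz)
          rw [heq] at hall hrp' ⊢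
          have hcy : c < y := lt_of_le_of_ne (hall y (by simp)) (Ne.symm hne)
          intro hc
          rcases List.mem_cons.mp hc with h | h
          · exact hne h.symm
          · have := (List.pairwise_cons.mp hrp').1 c h
            exact absurd (lt_of_lt_of_le hcy this) (lt_irrefl c)
      have hrestlen : rest'.length ≤ rest.length := by
        have := runSplit_length_le c rest; rwa [hrs] at this
      have hlen' : rest'.length ≤ n := le_trans hrestlen (Nat.le_of_succ_le_succ (by simpa using hl))
      dsimp only
      rw [ih rest' hlen' hrp']
      -- counts in l = c :: rest
      have hcount_c : (c :: rest).count c = k + 1 := by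
        rw [hsplit]
        simp [List.count_append, List.count_eq_zero.mpr hnotc]
      have hcount_x : ∀ x ∈ rest', (c :: rest).count x = rest'.count x := by
        intro x hx
        have hxc : x ≠ c := fun h => hnotc (h ▸ hx)
        have hcx : c ≠ x := fun h => hxc h.symm
        rw [hsplit]
        simp [List.count_append, List.count_replicate, hcx]
      have hany : ∀ m : Nat, ((c :: rest).any (fun x => (c :: rest).count x = m))
          = ((k + 1 = m : Bool) || rest'.any (fun x => rest'.count x = m)) := by
        intro m
        conv_lhs => rw [show (c :: rest) = c :: (List.replicate k c ++ rest') from by rw [← hsplit]]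
        simp only [List.any_cons, List.any_append, List.any_replicate]
        rw [← hsplit]
        have h1 : (decide ((c :: rest).count c = m)) = (decide (k + 1 = m)) := by
          rw [hcount_c]
        have h2 : rest'.any (fun x => decide ((c :: rest).count x = m))
            = rest'.any (fun x => decide (rest'.count x = m)) := by
          apply PySem.List.any_congr_mem
          intro x hx; rw [hcount_x x hx]
        rw [h1, h2]
        cases k with
        | zero => simp
        | succ k' => simp
      rw [hany 2, hany 3]
      simp only [Prod.mk.injEq]
      constructor <;> (by_cases h2' : k + 1 = 2 <;> by_cases h3' : k + 1 = 3 <;> simp_all)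

-- ===== VERDICT (by name: the statement is the Claim_ definition above) =====
theorem count_spec : Claim_equal_count := by
  intro id _
  unfold Spec_count count count_alt
  simp only [count_loop_eq_counter]
  rw [PySem.List.foldl_prod_mk (f := fun ok a => if a == (2 : Int) then true else ok)
    (g := fun ok a => if a == (3 : Int) then true else ok)]
  rw [PySem.List.foldl_if_true_eq, PySem.List.foldl_if_true_eq]
  rw [scanIdx_eq, List.drop_zero]
  have hs := scanRuns_spec (id.toList.length) (PySem.List.sorted id.toList (fun x => x) false)
    (by simp [pysem]) (by simpa using PySem.List.sorted_pairwise id.toList (fun x => x)) false false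
  rw [hs]
  have hperm : (PySem.List.sorted id.toList (fun x => x) false).Perm id.toList :=
    PySem.List.sorted_perm _ _ _
  have hv : (PySem.Dict.counter id.toList).values
      = (PySem.Set.ofList id.toList).map (fun k => (List.count k id.toList : Int)) := by
    simp [PySem.Dict.values, PySem.Dict.items_counter]
  rw [hv]
  simp only [List.any_map, Bool.false_or]
  simp only [Prod.mk.injEq]
  constructor <;> · -- each component: any over ofList = any over sorted list
    rw [Bool.eq_iff_iff]
    simp only [List.any_eq_true, PySem.Set.mem_ofList]
    constructor
    · rintro ⟨x, hx, hcx⟩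
      simp at hcx
      exact ⟨x, hperm.mem_iff.mpr hx, by rw [hperm.count_eq]; simp; omega⟩
    · rintro ⟨x, hx, hcx⟩
      refine ⟨x, hperm.mem_iff.mp hx, ?_⟩
      rw [hperm.count_eq] at hcx; simp at hcx ⊢; omega
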